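-- pv_equiv track=rewrite | github.com/horaciovelvetine/midas-alt | src/simulation/export/transformers.py | _get_sample_points
-- ===== SOURCE A (Python) =====
-- def _get_sample_points(age_months: int) -> list[int]:
--     """Get sample points for time series generation.
--
--     Uses adaptive sampling:
--     - Monthly for months 0-24 (recent data more important)
--     - Quarterly for months 24-120 (2-10 years)
--     - Yearly for older data
--
--     Args:
--         age_months: Total age in months.
--
--     Returns:
--         List of months_ago values to sample.
--     """
--     points = []
--
--     # Current month (months_ago = 0)
--     points.append(0)
--
--     # Monthly for first 24 months
--     for m in range(1, min(25, age_months + 1)):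
--         points.append(m)
--
--     # Quarterly from 24-120 months (2-10 years)
--     for m in range(27, min(121, age_months + 1), 3):
--         points.append(m)
--
--     # Yearly beyond 10 years
--     for m in range(132, age_months + 1, 12):
--         points.append(m)
--
--     # Always include the construction date
--     if age_months not in points:
--         points.append(age_months)
--
--     return sorted(set(points))
-- ===== SOURCE B (Python) =====
-- def _get_sample_points(age_months: int) -> list[int]:
--     """Adaptive sample months: monthly up to 2 years, quarterly to 10 years,
--     yearly after that, always including now (0) and the construction date."""
--     def nxt(m: int) -> int:
--         if m < 24:
--             return m + 1
--         if m < 120: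
--             return m + 3
--         return m + 12
--     points = {0, age_months}
--     m = 0
--     while m < age_months:
--         points.add(m)
--         m = nxt(m)
--     return sorted(points)
-- ===== Notes on version B (the rewrite author's own statement) =====
-- stated objective: alternative
-- what changed: Instead of three strided band loops appended and then deduplicated with sorted(set(...)), B walks the sample schedule once with a successor function (step one month below two years, quarterly below ten years, yearly after), accumulating into a set seeded with the endpoint months (now and the construction date).
import Mathlib
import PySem

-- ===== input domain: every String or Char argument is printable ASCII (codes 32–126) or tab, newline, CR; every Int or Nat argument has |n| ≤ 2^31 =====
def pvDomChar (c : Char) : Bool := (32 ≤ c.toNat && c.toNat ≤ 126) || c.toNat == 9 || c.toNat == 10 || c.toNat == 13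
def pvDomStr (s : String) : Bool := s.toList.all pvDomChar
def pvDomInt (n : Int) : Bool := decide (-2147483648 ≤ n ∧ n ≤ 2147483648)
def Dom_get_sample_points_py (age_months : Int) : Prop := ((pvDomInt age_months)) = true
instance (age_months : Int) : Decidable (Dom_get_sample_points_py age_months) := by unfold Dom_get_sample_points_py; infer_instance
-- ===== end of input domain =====

-- B walks the sample schedule once with a successor function into a set seeded with the endpoints, instead of A's three strided band loops; a genuinely different decomposition of similar cost.

-- ===== PORT A =====
def get_sample_points_py (age_months : Int) : List Int :=
  let points : List Int := []
  let points := points ++ [0]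
  let points := (PySem.List.pyRange 1 (min 25 (age_months + 1)) 1).foldl (fun acc m => acc ++ [m]) points
  let points := (PySem.List.pyRange 27 (min 121 (age_months + 1)) 3).foldl (fun acc m => acc ++ [m]) points
  let points := (PySem.List.pyRange 132 (age_months + 1) 12).foldl (fun acc m => acc ++ [m]) points
  let points := if age_months ∈ points then points else points ++ [age_months]
  PySem.List.sorted (PySem.Set.ofList points) (fun x => x)

-- ===== PORT B =====
-- def nxt(m): step of the sampling schedule
def pvNxt (m : Int) : Int :=
  if m < 24 then m + 1
  else if m < 120 then m + 3
  else m + 12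

-- the while loop of B: while m < age_months: points.add(m); m = nxt(m)
def pvWalk (age_months : Int) (m : Int) (points : PySem.Set Int) : PySem.Set Int :=
  if m < age_months then pvWalk age_months (pvNxt m) (PySem.Set.add points m)
  else points
termination_by (age_months - m).toNat
decreasing_by simp only [pvNxt]; split_ifs <;> omega

def get_sample_points_py_alt (age_months : Int) : List Int :=
  let points : PySem.Set Int := PySem.Set.ofList [0, age_months]
  PySem.List.sorted (pvWalk age_months 0 points) (fun x => x)

-- ===== PRECONDITION & SPEC =====
def Spec_get_sample_points_py (age_months : Int) (out : List Int) : Prop := out = get_sample_points_py_alt age_months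
instance (age_months : Int) (out : List Int) : Decidable (Spec_get_sample_points_py age_months out) := by unfold Spec_get_sample_points_py; infer_instance

-- ===== CLAIM (what is proved, stated in full; the proofs are below) =====
def Claim_equal_get_sample_points_py : Prop := ∀ (age_months : Int), Dom_get_sample_points_py age_months → Spec_get_sample_points_py age_months (get_sample_points_py age_months)

-- ===== LEMMAS AND PROOFS =====

-- an "aligned" month: a point the schedule walk starting at 0 can visit
def pvAligned (x : Int) : Prop :=
  (0 ≤ x ∧ x ≤ 24) ∨ (27 ≤ x ∧ x ≤ 120 ∧ (3:Int) ∣ x) ∨ (132 ≤ x ∧ (12:Int) ∣ x)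

theorem pvAligned_nxt {m : Int} (h : pvAligned m) : pvAligned (pvNxt m) := by
  unfold pvAligned pvNxt at *
  split_ifs <;> omega

theorem pvWalk_nodup (age_months : Int) : ∀ (m : Int) (pts : PySem.Set Int),
    pts.Nodup → (pvWalk age_months m pts).Nodup := by
  intro m pts h
  induction m, pts using pvWalk.induct age_months with
  | case1 m pts hlt ih => rw [pvWalk, if_pos hlt]; exact ih (PySem.Set.nodup_add _ _ h)
  | case2 m pts hlt => rw [pvWalk, if_neg hlt]; exact h

-- membership in the result of the walk, for an aligned starting point
theorem pvWalk_mem (age_months : Int) : ∀ (m : Int) (pts : PySem.Set Int), pvAligned m →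
    ∀ x, x ∈ pvWalk age_months m pts ↔ x ∈ pts ∨ (m ≤ x ∧ x < age_months ∧ pvAligned x) := by
  intro m pts hal x
  induction m, pts using pvWalk.induct age_months with
  | case1 m pts hlt ih =>
    rw [pvWalk, if_pos hlt, ih (pvAligned_nxt hal), PySem.Set.mem_add]
    constructor
    · rintro ((h | rfl) | ⟨h1, h2, h3⟩)
      · exact Or.inl h
      · exact Or.inr ⟨le_refl _, hlt, hal⟩
      · refine Or.inr ⟨?_, h2, h3⟩
        unfold pvNxt at h1
        unfold pvAligned at hal
        split_ifs at h1 <;> omega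
    · rintro (h | ⟨h1, h2, h3⟩)
      · exact Or.inl (Or.inl h)
      · by_cases hx : x = m
        · exact Or.inl (Or.inr hx)
        · refine Or.inr ⟨?_, h2, h3⟩
          -- no aligned point lies strictly between m and nxt m
          unfold pvNxt
          unfold pvAligned at hal h3
          split_ifs <;> omega
  | case2 m pts hlt =>
    rw [pvWalk, if_neg hlt]
    constructor
    · exact Or.inl
    · rintro (h | ⟨h1, h2, _⟩)
      · exact h
      · omega

theorem pvAligned_zero : pvAligned 0 := by unfold pvAligned; omega

-- ===== VERDICT (by name: the statement is the Claim_ definition above) =====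
theorem get_sample_points_py_spec : Claim_equal_get_sample_points_py := by
  intro a _
  unfold Spec_get_sample_points_py get_sample_points_py get_sample_points_py_alt
  simp only [PySem.List.foldl_append_singleton_eq_self, List.nil_append]
  -- membership characterisations of A's band lists
  have m2 : ∀ b x : Int, x ∈ PySem.List.pyRange 27 b 3 ↔ 27 ≤ x ∧ x < b ∧ (3:Int) ∣ x - 27 :=
    fun b x => PySem.List.mem_pyRange_iff_of_pos (by norm_num) x
  have m3 : ∀ b x : Int, x ∈ PySem.List.pyRange 132 b 12 ↔ 132 ≤ x ∧ x < b ∧ (12:Int) ∣ x - 132 :=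
    fun b x => PySem.List.mem_pyRange_iff_of_pos (by norm_num) x
  set pA : List Int := (([0] ++ PySem.List.pyRange 1 (min 25 (a + 1)) 1) ++
      PySem.List.pyRange 27 (min 121 (a + 1)) 3) ++ PySem.List.pyRange 132 (a + 1) 12 with hpA
  set LA : List Int := if a ∈ pA then pA else pA ++ [a] with hLA
  -- membership in A's final list, as a formula
  have hmemA : ∀ x, x ∈ LA ↔ x ∈ pA ∨ x = a := by
    intro x
    rw [hLA]
    split_ifs with h
    · constructor
      · exact Or.inl
      · rintro (hx | rfl) <;> [exact hx; exact h]
    · simp [List.mem_append]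
  have hmemA' : ∀ x, x ∈ pA ↔
      x = 0 ∨ (1 ≤ x ∧ x < min 25 (a + 1)) ∨ (27 ≤ x ∧ x < min 121 (a + 1) ∧ (3:Int) ∣ x - 27) ∨
      (132 ≤ x ∧ x < a + 1 ∧ (12:Int) ∣ x - 132) := by
    intro x
    simp only [hpA, List.mem_append, List.mem_singleton, PySem.List.mem_pyRange_one, m2, m3]
    tauto
  -- membership in B's set
  have hmemB : ∀ x, x ∈ pvWalk a 0 (PySem.Set.ofList [0, a]) ↔
      x ∈ PySem.Set.ofList ([0, a] : List Int) ∨ (0 ≤ x ∧ x < a ∧ pvAligned x) :=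
    pvWalk_mem a 0 _ pvAligned_zero
  -- the two lists are permutations of each other
  have hperm : (PySem.Set.ofList LA).Perm (pvWalk a 0 (PySem.Set.ofList [0, a])) := by
    refine (List.perm_ext_iff_of_nodup (PySem.Set.nodup_ofList _)
      (pvWalk_nodup a 0 _ (PySem.Set.nodup_ofList _))).mpr ?_
    intro x
    rw [PySem.Set.mem_ofList, hmemA x, hmemA' x, hmemB x, PySem.Set.mem_ofList]
    unfold pvAligned
    simp only [List.mem_cons, List.not_mem_nil, or_false]
    omega
  exact PySem.List.sorted_eq_sorted_of_perm _ _ _ (fun x y h => h) hperm
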